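-- pv_equiv track=rewrite | github.com/zhenispir/Competitive-Programming-in-Kazakh | Codeforces/Python/1999D.py | can_form_subsequence
-- ===== SOURCE A (Python) =====
-- def can_form_subsequence(s, t):
--     s_list = list(s)
--     t_len = len(t)
--     s_len = len(s)
--
--     t_index = 0
--
--     for i in range(s_len):
--         if t_index < t_len and (s_list[i] == t[t_index] or s_list[i] == '?'):
--             s_list[i] = t[t_index]
--             t_index += 1
--
--     if t_index == t_len:
--         for i in range(s_len):
--             if s_list[i] == '?':
--                 s_list[i] = 'a'
--         return "YES", ''.join(s_list)
--     else:
--         return "NO", ""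
-- ===== SOURCE B (Python) =====
-- def _lower_bound(lst, x):
--     lo, hi = 0, len(lst)
--     while lo < hi:
--         mid = (lo + hi) // 2
--         if lst[mid] < x:
--             lo = mid + 1
--         else:
--             hi = mid
--     return lo
--
-- def _next_slot(n, index, holes, ch, start):
--     best = n
--     lst = index.get(ch, [])
--     k = _lower_bound(lst, start)
--     if k < len(lst):
--         best = lst[k]
--     if ch != '?':
--         k = _lower_bound(holes, start)
--         if k < len(holes) and holes[k] < best:
--             best = holes[k]
--     return best
--
-- def can_form_subsequence(s, t):
--     index = {}
--     for i, c in enumerate(s):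
--         index.setdefault(c, []).append(i)
--     holes = index.get('?', [])
--     res = list(s)
--     nxt = 0
--     for ch in t:
--         best = _next_slot(len(s), index, holes, ch, nxt)
--         if best == len(s):
--             return "NO", ""
--         res[best] = ch
--         nxt = best + 1
--     return "YES", ''.join('a' if c == '?' else c for c in res)
-- ===== Notes on version B (the rewrite author's own statement) =====
-- stated objective: alternative
-- what changed: B first builds a per-character index (dict mapping each character to its sorted list of positions in s), then places each character of t by binary-searching the index lists of that character and of '?' for the smallest position past the cursor, taking their minimum, instead of A's single left-to-right scan of s with a t-pointer; no per-character scan of s remains.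
import Mathlib
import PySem

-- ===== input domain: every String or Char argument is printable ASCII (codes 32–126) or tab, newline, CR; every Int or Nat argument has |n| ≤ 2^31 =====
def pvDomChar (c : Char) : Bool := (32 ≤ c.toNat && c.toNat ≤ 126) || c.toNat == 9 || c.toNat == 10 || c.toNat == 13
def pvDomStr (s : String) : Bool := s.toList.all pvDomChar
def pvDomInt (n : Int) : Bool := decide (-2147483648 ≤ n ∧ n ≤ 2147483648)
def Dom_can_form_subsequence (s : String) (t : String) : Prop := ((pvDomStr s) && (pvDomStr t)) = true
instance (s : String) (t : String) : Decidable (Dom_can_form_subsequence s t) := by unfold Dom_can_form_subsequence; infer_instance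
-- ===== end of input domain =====

-- B builds a per-character position index once and binary-searches it to place each character of t (alternative algorithm, no per-character scan of s); A uses a single greedy scan of s.


-- ===== PORT A =====
-- A's single index loop over s with mutable s_list and t_index, rendered as a
-- structural recursion over s's characters carrying the remaining part of t;
-- returns (transformed s_list, remaining t characters).
def runA : List Char → List Char → List Char × List Char
  | [], ts => ([], ts)
  | x :: xs, [] => let p := runA xs []; (x :: p.1, p.2)
  | x :: xs, t0 :: ts =>
      if x = t0 ∨ x = '?' then
        let p := runA xs ts; (t0 :: p.1, p.2)
      else
        let p := runA xs (t0 :: ts); (x :: p.1, p.2)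

def fillA (c : Char) : Char := if c = '?' then 'a' else c

def can_form_subsequence (s : String) (t : String) : String × String :=
  let p := runA s.toList t.toList
  if p.2 = [] then ("YES", String.ofList (p.1.map fillA)) else ("NO", "")

-- ===== PORT B =====
-- _lower_bound(lst, x): hand-written binary search (first index whose element is ≥ x).
-- lst[mid] is always in range here (lo ≤ mid < hi ≤ len lst), so List.getD is exact.
def lbLoop (lst : List Int) (x : Int) (lo hi : Nat) : Nat :=
  if _h : lo < hi then
    let mid := (lo + hi) / 2
    if lst.getD mid 0 < x then lbLoop lst x (mid + 1) hi else lbLoop lst x lo mid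
  else lo
termination_by hi - lo
decreasing_by all_goals omega

def lowerBound (lst : List Int) (x : Int) : Nat := lbLoop lst x 0 lst.length

-- _next_slot(n, index, holes, ch, start): smallest position ≥ start holding ch or '?' (n if none).
-- lst[k] / holes[k2] are accessed only under k < len, so List.getD is exact.
def nextSlot (n : Int) (idx : PySem.Dict Char (List Int)) (holes : List Int)
    (ch : Char) (start : Int) : Int :=
  let lst := idx.getD ch []
  let k := lowerBound lst start
  let best := if k < lst.length then lst.getD k 0 else n
  if ch ≠ '?' then
    let k2 := lowerBound holes start
    if k2 < holes.length ∧ holes.getD k2 0 < best then holes.getD k2 0 else best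
  else best

-- the 'for ch in t' loop: writes each ch at its slot, advances the cursor; none = "NO".
def placeLoop (s : List Char) (idx : PySem.Dict Char (List Int)) (holes : List Int) :
    List Char → List Char → Int → Option (List Char)
  | [], res, _ => some res
  | ch :: ts, res, nxt =>
      let best := nextSlot (s.length : Int) idx holes ch nxt
      if best = (s.length : Int) then none
      else placeLoop s idx holes ts (PySem.List.pySetD res best ch) (best + 1)

def can_form_subsequence_alt (s : String) (t : String) : String × String :=
  let sl := s.toList
  let idx := (PySem.List.enumerate sl 0).foldl
      (fun d p => d.modify p.2 [] (· ++ [p.1])) PySem.Dict.empty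
  let holes := idx.getD '?' []
  match placeLoop sl idx holes t.toList sl 0 with
  | some res => ("YES", String.ofList (res.map (fun c => if c = '?' then 'a' else c)))
  | none => ("NO", "")

-- ===== PRECONDITION & SPEC =====
def Spec_can_form_subsequence (s : String) (t : String) (out : String × String) : Prop := out = can_form_subsequence_alt s t
instance (s : String) (t : String) (out : String × String) : Decidable (Spec_can_form_subsequence s t out) := by unfold Spec_can_form_subsequence; infer_instance

-- ===== CLAIM (what is proved, stated in full; the proofs are below) =====
def Claim_equal_can_form_subsequence : Prop := ∀ (s : String) (t : String), Dom_can_form_subsequence s t → Spec_can_form_subsequence s t (can_form_subsequence s t)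

-- ===== LEMMAS AND PROOFS =====

-- ---- proof-side specification objects ----

-- s[j] with default, kept opaque so simp does not renormalise it
def gD (l : List Char) (j : Nat) : Char := l.getD j 'a'

-- first relative index in a list satisfying p
def fmP (p : Char → Bool) : List Char → Option Nat
  | [] => none
  | x :: xs => if p x then some 0 else (fmP p xs).map (· + 1)

-- positions (as Python ints, offset k) of the occurrences of c in xs
def occI : List Char → Int → Char → List Int
  | [], _, _ => []
  | ch :: rest, k, c => if ch == c then k :: occI rest (k + 1) c else occI rest (k + 1) c

-- "o is the first position ≥ x (and < length) of s satisfying p"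
def IsNext (s : List Char) (p : Char → Bool) (x : Nat) : Option Nat → Prop
  | some j => x ≤ j ∧ j < s.length ∧ p (gD s j) = true ∧
      ∀ m, x ≤ m → m < j → p (gD s m) = false
  | none => ∀ m, x ≤ m → m < s.length → p (gD s m) = false

-- first-slot of two candidate options (none = no slot)
def ominN : Option Nat → Option Nat → Option Nat
  | none, b => b
  | some a, none => some a
  | some a, some b => some (min a b)

-- cast an optional Nat position to the Int the port computes
def onat : Option Nat → Option Int
  | none => none
  | some j => some (j : Int)

def onatD (n : Int) : Option Nat → Int
  | none => n
  | some j => (j : Int)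

theorem onat_none : onat none = none := rfl
theorem onat_some (j : Nat) : onat (some j) = some ((j : Int)) := rfl
theorem onatD_none (n : Int) : onatD n none = n := rfl
theorem onatD_some (n : Int) (j : Nat) : onatD n (some j) = (j : Int) := rfl
theorem getD_onat (n : Int) (o : Option Nat) : (onat o).getD n = onatD n o := by
  cases o <;> rfl

theorem runA_nil : ∀ s : List Char, runA s [] = (s, []) := by
  intro s; induction s with
  | nil => rfl
  | cons x xs ih => simp [runA, ih]

-- ---- generic list helpers ----

theorem gD_cons_zero (x : Char) (xs : List Char) : gD (x :: xs) 0 = x := rfl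

theorem gD_cons_succ (x : Char) (xs : List Char) (j : Nat) : gD (x :: xs) (j + 1) = gD xs j := rfl

theorem gD_eq_getElem (l : List Char) (n : Nat) (h : n < l.length) : gD l n = l[n] :=
  List.getD_eq_getElem l 'a' h

theorem gD_drop_add (l : List Char) (n m : Nat) :
    gD (l.drop n) m = gD l (n + m) := by
  simp [gD, List.getD_eq_getElem?_getD, List.getElem?_drop]

theorem gD_set_ne (l : List Char) (b j : Nat) (c : Char) (h : j ≠ b) :
    gD (l.set b c) j = gD l j := by
  simp [gD, List.getD_eq_getElem?_getD, List.getElem?_set_ne (Ne.symm h)]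

theorem take_set_succ (c : Char) : ∀ (l : List Char) (b : Nat), b < l.length →
    (l.set b c).take (b + 1) = l.take b ++ [c] := by
  intro l
  induction l with
  | nil => intro b h; simp at h
  | cons x xs ih =>
    intro b h
    cases b with
    | zero => simp
    | succ b =>
      have hb : b < xs.length := by simpa using h
      simp [ih b hb]

theorem drop_eq_of_agree (res sl : List Char) (x : Nat) (hlen : res.length = sl.length)
    (hag : ∀ j, x ≤ j → j < sl.length → gD res j = gD sl j) :
    res.drop x = sl.drop x := by
  apply List.ext_getElem
  · simp [hlen]
  · intro i h1 h2
    have hx : x + i < sl.length := by simp at h2; omega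
    have := hag (x + i) (by omega) hx
    rw [gD_eq_getElem res (x + i) (by omega), gD_eq_getElem sl (x + i) (by omega)] at this
    simpa [List.getElem_drop] using this

theorem take_prefix_agree (res sl : List Char) (x b : Nat) (hlen : res.length = sl.length)
    (hag : ∀ j, x ≤ j → j < sl.length → gD res j = gD sl j)
    (hxb : x ≤ b) :
    res.take b = res.take x ++ (sl.drop x).take (b - x) := by
  rw [← drop_eq_of_agree res sl x hlen hag]
  have hb : b = x + (b - x) := by omega
  rw [hb, List.take_add]
  have h2 : x + (b - x) - x = b - x := by omega
  rw [h2]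

-- ---- IsNext facts ----

theorem IsNext_unique {s : List Char} {p : Char → Bool} {x : Nat} {o o' : Option Nat}
    (h : IsNext s p x o) (h' : IsNext s p x o') : o = o' := by
  match o, o' with
  | none, none => rfl
  | none, some j =>
    have hf := h j h'.1 h'.2.1
    rw [h'.2.2.1] at hf
    simp at hf
  | some j, none =>
    have hf := h' j h.1 h.2.1
    rw [h.2.2.1] at hf
    simp at hf
  | some j, some j' =>
    have h1 : ¬ j < j' := by
      intro hlt
      have hf := h'.2.2.2 j h.1 hlt
      rw [h.2.2.1] at hf
      simp at hf
    have h2 : ¬ j' < j := by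
      intro hlt
      have hf := h.2.2.2 j' h'.1 hlt
      rw [h'.2.2.1] at hf
      simp at hf
    have : j = j' := by omega
    rw [this]

theorem IsNext_congr {s : List Char} {p q : Char → Bool} {x : Nat} {o : Option Nat}
    (hpq : ∀ ch, p ch = q ch) (h : IsNext s p x o) : IsNext s q x o := by
  match o with
  | none => intro m h1 h2; rw [← hpq]; exact h m h1 h2
  | some j =>
    refine ⟨h.1, h.2.1, by rw [← hpq]; exact h.2.2.1, ?_⟩
    intro m h1 h2; rw [← hpq]; exact h.2.2.2 m h1 h2

theorem IsNext_or {s : List Char} {p q : Char → Bool} {x : Nat} {o1 o2 : Option Nat}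
    (h1 : IsNext s p x o1) (h2 : IsNext s q x o2) :
    IsNext s (fun ch => p ch || q ch) x (ominN o1 o2) := by
  match o1, o2 with
  | none, none =>
    intro m hm1 hm2
    show (p (gD s m) || q (gD s m)) = false
    rw [h1 m hm1 hm2, h2 m hm1 hm2]; rfl
  | none, some j =>
    refine ⟨h2.1, h2.2.1, ?_, ?_⟩
    · show (p (gD s j) || q (gD s j)) = true
      rw [h2.2.2.1, Bool.or_true]
    · intro m hm1 hm2
      show (p (gD s m) || q (gD s m)) = false
      rw [h1 m hm1 (Nat.lt_trans hm2 h2.2.1), h2.2.2.2 m hm1 hm2]; rfl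
  | some j, none =>
    refine ⟨h1.1, h1.2.1, ?_, ?_⟩
    · show (p (gD s j) || q (gD s j)) = true
      rw [h1.2.2.1, Bool.true_or]
    · intro m hm1 hm2
      show (p (gD s m) || q (gD s m)) = false
      rw [h2 m hm1 (Nat.lt_trans hm2 h1.2.1), h1.2.2.2 m hm1 hm2]; rfl
  | some j1, some j2 =>
    show IsNext s (fun ch => p ch || q ch) x (some (min j1 j2))
    rcases Nat.lt_or_ge j2 j1 with hlt | hge
    · have hmin : min j1 j2 = j2 := Nat.min_eq_right (Nat.le_of_lt hlt)
      rw [hmin]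
      refine ⟨h2.1, h2.2.1, ?_, ?_⟩
      · show (p (gD s j2) || q (gD s j2)) = true
        rw [h2.2.2.1, Bool.or_true]
      · intro m hm1 hm2
        show (p (gD s m) || q (gD s m)) = false
        rw [h1.2.2.2 m hm1 (Nat.lt_trans hm2 hlt), h2.2.2.2 m hm1 hm2]; rfl
    · have hmin : min j1 j2 = j1 := Nat.min_eq_left hge
      rw [hmin]
      refine ⟨h1.1, h1.2.1, ?_, ?_⟩
      · show (p (gD s j1) || q (gD s j1)) = true
        rw [h1.2.2.1, Bool.true_or]
      · intro m hm1 hm2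
        show (p (gD s m) || q (gD s m)) = false
        rw [h1.2.2.2 m hm1 hm2, h2.2.2.2 m hm1 (Nat.lt_of_lt_of_le hm2 hge)]; rfl

-- ---- fmP facts ----

theorem fmP_some {p : Char → Bool} : ∀ (l : List Char) (r : Nat), fmP p l = some r →
    r < l.length ∧ p (gD l r) = true ∧ ∀ m, m < r → p (gD l m) = false := by
  intro l
  induction l with
  | nil => intro r h; simp [fmP] at h
  | cons ch rest ih =>
    intro r h
    by_cases hc : p ch = true
    · simp only [fmP, if_pos hc] at h
      obtain rfl : (0 : Nat) = r := by simpa using h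
      refine ⟨by simp, ?_, ?_⟩
      · rw [gD_cons_zero]; exact hc
      · intro m hm; exact absurd hm (Nat.not_lt_zero m)
    · simp only [fmP, if_neg hc] at h
      cases hfm : fmP p rest with
      | none => rw [hfm] at h; simp at h
      | some r' =>
        rw [hfm] at h
        simp only [Option.map_some, Option.some.injEq] at h
        obtain rfl : r' + 1 = r := h
        obtain ⟨ha, hb, hmm⟩ := ih r' hfm
        have hcf : p ch = false := by simpa using hc
        refine ⟨by simp only [List.length_cons]; omega, ?_, ?_⟩
        · rw [gD_cons_succ]; exact hb
        · intro m hm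
          cases m with
          | zero => rw [gD_cons_zero]; exact hcf
          | succ m => rw [gD_cons_succ]; exact hmm m (by omega)

theorem fmP_none {p : Char → Bool} : ∀ (l : List Char), fmP p l = none →
    ∀ m, m < l.length → p (gD l m) = false := by
  intro l
  induction l with
  | nil => intro _ m hm; simp at hm
  | cons ch rest ih =>
    intro h m hm
    by_cases hc : p ch = true
    · simp [fmP, hc] at h
    · simp only [fmP, if_neg hc] at h
      cases hfm : fmP p rest with
      | some r => rw [hfm] at h; simp at h
      | none =>
        have hcf : p ch = false := by simpa using hc
        cases m with
        | zero => rw [gD_cons_zero]; exact hcf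
        | succ m => rw [gD_cons_succ]; exact ih hfm m (by simpa using hm)

theorem fmP_drop (sl : List Char) (p : Char → Bool) (x : Nat) (hx : x ≤ sl.length) :
    IsNext sl p x ((fmP p (sl.drop x)).map (x + ·)) := by
  cases hfm : fmP p (sl.drop x) with
  | none =>
    show IsNext sl p x none
    intro m hm1 hm2
    have := fmP_none (sl.drop x) hfm (m - x) (by simp only [List.length_drop]; omega)
    rwa [gD_drop_add, Nat.add_sub_cancel' hm1] at this
  | some r =>
    show IsNext sl p x (some (x + r))
    obtain ⟨h1, h2, h3⟩ := fmP_some (sl.drop x) r hfm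
    have hlen : r < sl.length - x := by simpa using h1
    refine ⟨by omega, by omega, ?_, ?_⟩
    · rw [← gD_drop_add]; exact h2
    · intro m hm1 hm2
      have := h3 (m - x) (by omega)
      rwa [gD_drop_add, Nat.add_sub_cancel' hm1] at this

-- ---- occI facts ----

theorem mem_occI {c : Char} : ∀ (xs : List Char) (k v : Int),
    v ∈ occI xs k c ↔ ∃ j : Nat, j < xs.length ∧ v = k + (j : Int) ∧ gD xs j = c := by
  intro xs
  induction xs with
  | nil => intro k v; simp [occI]
  | cons ch rest ih =>
    intro k v
    by_cases hc : ch = c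
    · have hce : (ch == c) = true := by simp [hc]
      rw [occI, if_pos hce]
      simp only [List.mem_cons, ih]
      constructor
      · rintro (rfl | ⟨j, hj, rfl, hgd⟩)
        · exact ⟨0, by simp, by simp, by rw [gD_cons_zero]; exact hc⟩
        · refine ⟨j + 1, by simp only [List.length_cons]; omega, ?_, by rw [gD_cons_succ]; exact hgd⟩
          push_cast; ring
      · rintro ⟨j, hj, rfl, hgd⟩
        cases j with
        | zero => left; simp
        | succ j =>
          right
          refine ⟨j, by simp only [List.length_cons] at hj; omega, ?_, by rwa [gD_cons_succ] at hgd⟩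
          push_cast; ring
    · have hce : ¬ ((ch == c) = true) := by simp [hc]
      rw [occI, if_neg hce]
      rw [ih]
      constructor
      · rintro ⟨j, hj, rfl, hgd⟩
        refine ⟨j + 1, by simp only [List.length_cons]; omega, ?_, by rw [gD_cons_succ]; exact hgd⟩
        push_cast; ring
      · rintro ⟨j, hj, rfl, hgd⟩
        cases j with
        | zero => exact absurd (by rwa [gD_cons_zero] at hgd) hc
        | succ j =>
          refine ⟨j, by simp only [List.length_cons] at hj; omega, ?_, by rwa [gD_cons_succ] at hgd⟩
          push_cast; ring

theorem occI_lb {c : Char} (xs : List Char) (k v : Int) (h : v ∈ occI xs k c) : k ≤ v := by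
  obtain ⟨j, _, rfl, _⟩ := (mem_occI xs k v).mp h
  have : (0 : Int) ≤ (j : Int) := Int.natCast_nonneg j
  omega

theorem sorted_occI {c : Char} : ∀ (xs : List Char) (k : Int),
    (occI xs k c).Pairwise (· < ·) := by
  intro xs
  induction xs with
  | nil => intro k; simp [occI]
  | cons ch rest ih =>
    intro k
    by_cases hc : (ch == c) = true
    · rw [occI, if_pos hc]
      refine List.Pairwise.cons ?_ (ih (k + 1))
      intro v hv
      have := occI_lb rest (k + 1) v hv
      omega
    · rw [occI, if_neg hc]
      exact ih (k + 1)

-- the dict built by B's first loop has, at every key c, exactly occI sl 0 c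
theorem enum_filter_eq_occI (c : Char) : ∀ (xs : List Char) (k : Int),
    ((PySem.List.enumerate xs k).filter (fun p => p.2 == c)).map (fun p => p.1) = occI xs k c := by
  intro xs
  induction xs with
  | nil => intro k; simp [PySem.List.enumerate_nil, occI]
  | cons ch rest ih =>
    intro k
    rw [PySem.List.enumerate_cons]
    by_cases hc : (ch == c) = true
    · rw [occI, if_pos hc]
      rw [List.filter_cons_of_pos (by simpa using hc)]
      simp [ih]
    · rw [occI, if_neg hc]
      rw [List.filter_cons_of_neg (by simpa using hc)]
      exact ih (k + 1)

theorem idx_getD_eq_occI (sl : List Char) (c : Char) :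
    ((PySem.List.enumerate sl 0).foldl
      (fun d p => d.modify p.2 [] (· ++ [p.1])) PySem.Dict.empty).getD c []
    = occI sl 0 c := by
  have h := PySem.Dict.getD_foldl_modify_append
    ((PySem.List.enumerate sl 0).map (fun p => (p.2, p.1))) PySem.Dict.empty c
  rw [List.foldl_map] at h
  simp only [PySem.Dict.getD_empty, List.nil_append] at h
  rw [List.filter_map, List.map_map] at h
  simp only [Function.comp_def] at h
  rw [h]
  exact enum_filter_eq_occI c sl 0

-- ---- binary search ----

theorem getD_mono_of_pairwise {L : List Int} (h : L.Pairwise (· < ·)) :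
    ∀ i j : Nat, i ≤ j → j < L.length → L.getD i 0 ≤ L.getD j 0 := by
  intro i j hij hj
  rcases eq_or_lt_of_le hij with rfl | hlt
  · exact le_refl _
  · have := (List.pairwise_iff_getElem.mp h) i j (by omega) hj hlt
    rw [List.getD_eq_getElem L 0 (by omega), List.getD_eq_getElem L 0 hj]
    omega

theorem lbLoop_spec (L : List Int) (x : Int)
    (hs : ∀ i j : Nat, i ≤ j → j < L.length → L.getD i 0 ≤ L.getD j 0) :
    ∀ (lo hi : Nat), hi ≤ L.length → lo ≤ hi →
      (∀ m, m < lo → L.getD m 0 < x) →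
      (∀ m, hi ≤ m → m < L.length → x ≤ L.getD m 0) →
      lbLoop L x lo hi ≤ L.length ∧
      (∀ m, m < lbLoop L x lo hi → L.getD m 0 < x) ∧
      (∀ m, lbLoop L x lo hi ≤ m → m < L.length → x ≤ L.getD m 0) := by
  intro lo hi
  induction hn : hi - lo using Nat.strong_induction_on generalizing lo hi with
  | _ n ihn =>
  intro hhi hlh hlo hhi2
  by_cases h : lo < hi
  · rw [lbLoop]
    simp only [dif_pos h]
    by_cases hm : L.getD ((lo + hi) / 2) 0 < x
    · simp only [if_pos hm]
      exact ihn (hi - ((lo + hi) / 2 + 1)) (by omega) ((lo + hi) / 2 + 1) hi rfl hhi (by omega)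
        (fun m h2 => lt_of_le_of_lt (hs m ((lo + hi) / 2) (by omega) (by omega)) hm) hhi2
    · simp only [if_neg hm]
      exact ihn ((lo + hi) / 2 - lo) (by omega) lo ((lo + hi) / 2) rfl (by omega) (by omega) hlo
        (fun m h2 h3 => le_trans (not_lt.mp hm) (hs ((lo + hi) / 2) m h2 h3))
  · rw [lbLoop]
    simp only [dif_neg h]
    exact ⟨by omega, hlo, fun m h2 h3 => hhi2 m (by omega) h3⟩

theorem lowerBound_spec (L : List Int) (x : Int) (hp : L.Pairwise (· < ·)) :
    lowerBound L x ≤ L.length ∧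
    (∀ m, m < lowerBound L x → L.getD m 0 < x) ∧
    (∀ m, lowerBound L x ≤ m → m < L.length → x ≤ L.getD m 0) := by
  exact lbLoop_spec L x (getD_mono_of_pairwise hp) 0 L.length (le_refl _) (by omega)
    (by omega) (by omega)

-- the "if k < len then some lst[k] else none" of B's search is the first position ≥ x with char c
theorem firstGE_occI (sl : List Char) (c : Char) (x : Nat) :
    ∃ o : Option Nat, IsNext sl (fun ch => ch == c) x o ∧
      (if lowerBound (occI sl 0 c) (x : Int) < (occI sl 0 c).length
       then some ((occI sl 0 c).getD (lowerBound (occI sl 0 c) (x : Int)) 0)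
       else none) = onat o := by
  obtain ⟨hk1, hk2, hk3⟩ := lowerBound_spec (occI sl 0 c) (x : Int) (sorted_occI sl 0)
  by_cases hkl : lowerBound (occI sl 0 c) (x : Int) < (occI sl 0 c).length
  · have hmem : (occI sl 0 c).getD (lowerBound (occI sl 0 c) (x : Int)) 0 ∈ occI sl 0 c := by
      rw [List.getD_eq_getElem (occI sl 0 c) 0 hkl]
      exact List.getElem_mem hkl
    obtain ⟨j, hjlen, hjv, hjc⟩ := (mem_occI sl 0 _).mp hmem
    refine ⟨some j, ⟨?_, hjlen, by simp [hjc], ?_⟩, ?_⟩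
    · have hle := hk3 (lowerBound (occI sl 0 c) (x : Int)) (le_refl _) hkl
      rw [hjv] at hle
      simp only [zero_add] at hle
      exact_mod_cast hle
    · intro m hm1 hm2
      by_contra hcm
      have hmc : gD sl m = c := by simpa using hcm
      have hmmem : ((m : Int)) ∈ occI sl 0 c := (mem_occI sl 0 (m : Int)).mpr
        ⟨m, by omega, by simp, hmc⟩
      obtain ⟨i, hi, hiv⟩ := List.mem_iff_getElem.mp hmmem
      rcases Nat.lt_or_ge i (lowerBound (occI sl 0 c) (x : Int)) with hik | hik
      · have hlt := hk2 i hik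
        rw [List.getD_eq_getElem (occI sl 0 c) 0 hi, hiv] at hlt
        have : m < x := by exact_mod_cast hlt
        omega
      · have hle := getD_mono_of_pairwise (sorted_occI sl 0) (lowerBound (occI sl 0 c) (x : Int)) i hik hi
        rw [List.getD_eq_getElem (occI sl 0 c) 0 hi, hiv, hjv] at hle
        simp only [zero_add] at hle
        have : j ≤ m := by exact_mod_cast hle
        omega
    · rw [if_pos hkl, hjv, onat_some]
      simp
  · refine ⟨none, ?_, by rw [if_neg hkl]; rfl⟩
    intro m hm1 hm2
    by_contra hcm
    have hmc : gD sl m = c := by simpa using hcm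
    have hmmem : ((m : Int)) ∈ occI sl 0 c := (mem_occI sl 0 (m : Int)).mpr ⟨m, by omega, by simp, hmc⟩
    obtain ⟨i, hi, hiv⟩ := List.mem_iff_getElem.mp hmmem
    have hlt := hk2 i (by omega)
    rw [List.getD_eq_getElem (occI sl 0 c) 0 hi, hiv] at hlt
    have : m < x := by exact_mod_cast hlt
    omega

theorem ite_some_getD {P : Prop} [Decidable P] (a n : Int) :
    (if P then a else n) = (if P then some a else (none : Option Int)).getD n := by
  split_ifs <;> rfl

-- nextSlot computes the first position ≥ x matching "= c or '?'" (length when none)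
theorem nextSlot_spec (sl : List Char) (c : Char) (x : Nat) :
    ∃ o : Option Nat, IsNext sl (fun ch => ch == c || ch == '?') x o ∧
      nextSlot (sl.length : Int) ((PySem.List.enumerate sl 0).foldl
        (fun d p => d.modify p.2 [] (· ++ [p.1])) PySem.Dict.empty)
        (occI sl 0 '?') c (x : Int)
      = onatD (sl.length : Int) o := by
  obtain ⟨o1, ho1, he1⟩ := firstGE_occI sl c x
  by_cases hch : c = '?'
  · subst hch
    refine ⟨o1, IsNext_congr (fun ch => (Bool.or_self (ch == '?')).symm) ho1, ?_⟩
    simp only [nextSlot, idx_getD_eq_occI]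
    rw [if_neg (fun h => h rfl)]
    rw [ite_some_getD, he1, getD_onat]
  · obtain ⟨o2, ho2, he2⟩ := firstGE_occI sl '?' x
    refine ⟨ominN o1 o2, IsNext_or ho1 ho2, ?_⟩
    simp only [nextSlot, idx_getD_eq_occI]
    rw [if_pos hch]
    by_cases hk1 : lowerBound (occI sl 0 c) (x : Int) < (occI sl 0 c).length
    · rw [if_pos hk1] at he1
      rw [if_pos hk1]
      rcases o1 with _ | j1
      · rw [onat_none] at he1; simp at he1
      · rw [onat_some] at he1
        simp only [Option.some.injEq] at he1
        rw [he1]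
        by_cases hk2 : lowerBound (occI sl 0 '?') (x : Int) < (occI sl 0 '?').length
        · rw [if_pos hk2] at he2
          rcases o2 with _ | j2
          · rw [onat_none] at he2; simp at he2
          · rw [onat_some] at he2
            simp only [Option.some.injEq] at he2
            rw [he2]
            by_cases hj : j2 < j1
            · rw [if_pos ⟨hk2, by exact_mod_cast hj⟩]
              simp only [ominN, onatD_some]
              rw [Nat.min_eq_right (Nat.le_of_lt hj)]
            · rw [if_neg (fun hcc => hj (by exact_mod_cast hcc.2))]
              simp only [ominN, onatD_some]
              rw [Nat.min_eq_left (by omega)]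
        · rw [if_neg hk2] at he2
          rcases o2 with _ | j2
          · rw [if_neg (fun hcc => hk2 hcc.1)]
            simp [ominN, onatD_some]
          · rw [onat_some] at he2; simp at he2
    · rw [if_neg hk1] at he1
      rw [if_neg hk1]
      rcases o1 with _ | j1
      swap
      · rw [onat_some] at he1; simp at he1
      · by_cases hk2 : lowerBound (occI sl 0 '?') (x : Int) < (occI sl 0 '?').length
        · rw [if_pos hk2] at he2
          rcases o2 with _ | j2
          · rw [onat_none] at he2; simp at he2
          · rw [onat_some] at he2
            simp only [Option.some.injEq] at he2
            rw [he2]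
            have hj2l : j2 < sl.length := ho2.2.1
            rw [if_pos ⟨hk2, by exact_mod_cast hj2l⟩]
            simp [ominN, onatD_some]
        · rw [if_neg hk2] at he2
          rcases o2 with _ | j2
          · rw [if_neg (fun hcc => hk2 hcc.1)]
            simp [ominN, onatD_none]
          · rw [onat_some] at he2; simp at he2

-- runA in "jump" form: one matched character at a time
theorem runA_jump (c : Char) (ts : List Char) : ∀ s : List Char,
    runA s (c :: ts) =
      match fmP (fun ch => ch == c || ch == '?') s with
      | none => (s, c :: ts)
      | some r => (s.take r ++ c :: (runA (s.drop (r + 1)) ts).1,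
                   (runA (s.drop (r + 1)) ts).2) := by
  intro s
  induction s with
  | nil => simp [runA, fmP]
  | cons x xs ih =>
    by_cases hx : x = c ∨ x = '?'
    · have hp : (x == c || x == '?') = true := by
        rcases hx with h | h <;> simp [h]
      have hfm1 : fmP (fun ch => ch == c || ch == '?') (x :: xs) = some 0 := by
        simp [fmP, hp]
      rw [hfm1]
      simp only [runA, if_pos hx]
      simp
    · have hp : (x == c || x == '?') = false := by
        rw [not_or] at hx
        simp [hx.1, hx.2]
      have hfm1 : fmP (fun ch => ch == c || ch == '?') (x :: xs)
          = (fmP (fun ch => ch == c || ch == '?') xs).map (· + 1) := by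
        simp [fmP, hp]
      rw [hfm1]
      have hrw : runA (x :: xs) (c :: ts)
          = (x :: (runA xs (c :: ts)).1, (runA xs (c :: ts)).2) := by
        simp only [runA, if_neg hx]
      rw [hrw, ih]
      cases hfm : fmP (fun ch => ch == c || ch == '?') xs with
      | none => simp
      | some r => simp [List.take_succ_cons, List.drop_succ_cons]

-- the main loop invariant
theorem placeLoop_eq (sl : List Char) : ∀ (t res : List Char) (x : Nat),
    x ≤ sl.length → res.length = sl.length →
    (∀ j, x ≤ j → j < sl.length → gD res j = gD sl j) →
    placeLoop sl ((PySem.List.enumerate sl 0).foldl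
        (fun d p => d.modify p.2 [] (· ++ [p.1])) PySem.Dict.empty)
      (occI sl 0 '?') t res (x : Int)
    = (if (runA (sl.drop x) t).2 = [] then some (res.take x ++ (runA (sl.drop x) t).1) else none) := by
  intro t
  induction t with
  | nil =>
    intro res x hx hlen hag
    simp only [placeLoop]
    rw [runA_nil, ← drop_eq_of_agree res sl x hlen hag]
    simp [List.take_append_drop]
  | cons c ts ih =>
    intro res x hx hlen hag
    obtain ⟨o, hIs, hval⟩ := nextSlot_spec sl c x
    have hdr := fmP_drop sl (fun ch => ch == c || ch == '?') x hx
    have ho := IsNext_unique hIs hdr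
    rw [runA_jump]
    simp only [placeLoop]
    rw [hval]
    cases hfm : fmP (fun ch => ch == c || ch == '?') (sl.drop x) with
    | none =>
      rw [hfm] at ho
      have ho' : o = none := ho
      subst ho'
      rw [onatD_none]
      rw [if_pos rfl, if_neg (by simp)]
    | some r =>
      rw [hfm] at ho
      have ho' : o = some (x + r) := ho
      subst ho'
      obtain ⟨hxb, hblen, hmatch, hmin⟩ := hIs
      rw [onatD_some]
      rw [if_neg (by exact_mod_cast Nat.ne_of_lt hblen)]
      rw [PySem.List.pySetD_natCast]
      have hcast : ((x + r : Nat) : Int) + 1 = ((x + r + 1 : Nat) : Int) := by push_cast; ring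
      rw [hcast]
      rw [ih (res.set (x + r) c) (x + r + 1) (by omega) (by simp [hlen])
        (fun j h1 h2 => by
          rw [gD_set_ne res (x + r) j c (by omega)]
          exact hag j (by omega) h2)]
      dsimp only
      have hdd : (List.drop x sl).drop (r + 1) = sl.drop (x + r + 1) := by
        rw [List.drop_drop]
        try congr 1
        try omega
      simp only [hdd]
      by_cases hrest : (runA (sl.drop (x + r + 1)) ts).2 = []
      · rw [if_pos hrest, if_pos hrest]
        congr 1
        rw [take_set_succ c res (x + r) (by omega)]
        rw [take_prefix_agree res sl x (x + r) hlen hag (by omega)]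
        have hsub : x + r - x = r := by omega
        rw [hsub]
        simp [List.append_assoc]
      · rw [if_neg hrest, if_neg hrest]

-- ===== VERDICT (by name: the statement is the Claim_ definition above) =====
theorem can_form_subsequence_spec : Claim_equal_can_form_subsequence := by
  intro s t _
  unfold Spec_can_form_subsequence
  have hA : can_form_subsequence s t =
      (if (runA s.toList t.toList).2 = [] then
        ("YES", String.ofList ((runA s.toList t.toList).1.map fillA)) else ("NO", "")) := rfl
  have hB : can_form_subsequence_alt s t =
      (match placeLoop s.toList ((PySem.List.enumerate s.toList 0).foldl
          (fun d p => d.modify p.2 [] (· ++ [p.1])) PySem.Dict.empty)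
          (((PySem.List.enumerate s.toList 0).foldl
            (fun d p => d.modify p.2 [] (· ++ [p.1])) PySem.Dict.empty).getD '?' [])
          t.toList s.toList 0 with
        | some res => ("YES", String.ofList (res.map (fun c => if c = '?' then 'a' else c)))
        | none => ("NO", "")) := rfl
  rw [hA, hB, idx_getD_eq_occI s.toList '?']
  have h := placeLoop_eq s.toList t.toList s.toList 0 (by omega) rfl (fun j _ _ => rfl)
  simp only [Nat.cast_zero, List.drop_zero, List.take_zero, List.nil_append] at h
  rw [h]
  by_cases h2 : (runA s.toList t.toList).2 = []
  · simp [h2]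
    rfl
  · simp [h2]
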